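-- pv_equiv track=rewrite | github.com/shlokanegi/vg_anchors | visualization/prep_data_viz.py | create_anchor_connectivity
-- ===== SOURCE A (Python) =====
-- import itertools
-- from collections import defaultdict
--
-- def create_anchor_connectivity(transformed_data):
--     """
--     Calculates how many reads are shared between each pair of anchors.
--     """
--     read_to_anchors = defaultdict(set)
--     for anchor_id, reads in transformed_data.items():
--         for read in reads:
--             read_to_anchors[read['read_id']].add(anchor_id)
--
--     connectivity = defaultdict(lambda: defaultdict(int))
--     for anchors_set in read_to_anchors.values():
--         if len(anchors_set) > 1:
--             for anchor1, anchor2 in itertools.combinations(sorted(list(anchors_set)), 2):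
--                 connectivity[anchor1][anchor2] += 1
--
--     final_connectivity = defaultdict(dict)
--     for anchor1, connections in connectivity.items():
--         for anchor2, count in connections.items():
--             final_connectivity[anchor1][anchor2] = {"common_read_count": count}
--
--     return dict(final_connectivity)
-- ===== SOURCE B (Python) =====
-- def create_anchor_connectivity(transformed_data):
--     """
--     Calculates how many reads are shared between each pair of anchors.
--     """
--     anchor_reads = {}   # anchor_id -> set of read ids
--     read_anchors = {}   # read_id -> anchors it occurs under (fixes output ordering)
--     for anchor_id, reads in transformed_data.items():
--         for read in reads:
--             rid = read['read_id']
--             anchor_reads.setdefault(anchor_id, set()).add(rid)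
--             read_anchors.setdefault(rid, []).append(anchor_id)
--
--     result = {}
--     for anchors in read_anchors.values():
--         uniq = sorted(set(anchors))
--         for i, a1 in enumerate(uniq):
--             for a2 in uniq[i + 1:]:
--                 inner = result.setdefault(a1, {})
--                 if a2 not in inner:
--                     inner[a2] = {"common_read_count": len(anchor_reads[a1] & anchor_reads[a2])}
--     return result
-- ===== Notes on version B (the rewrite author's own statement) =====
-- stated objective: alternative
-- what changed: Counts are no longer accumulated by incrementing a per-pair counter over reads: B builds an anchor->set-of-read-ids index in the same single pass that records each read's anchors, and computes each pair's value once, at first encounter, as the size of the set intersection of the two anchors' read sets, writing it directly into the nested result (no counter dict, no final regroup/copy pass).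
import Mathlib
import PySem

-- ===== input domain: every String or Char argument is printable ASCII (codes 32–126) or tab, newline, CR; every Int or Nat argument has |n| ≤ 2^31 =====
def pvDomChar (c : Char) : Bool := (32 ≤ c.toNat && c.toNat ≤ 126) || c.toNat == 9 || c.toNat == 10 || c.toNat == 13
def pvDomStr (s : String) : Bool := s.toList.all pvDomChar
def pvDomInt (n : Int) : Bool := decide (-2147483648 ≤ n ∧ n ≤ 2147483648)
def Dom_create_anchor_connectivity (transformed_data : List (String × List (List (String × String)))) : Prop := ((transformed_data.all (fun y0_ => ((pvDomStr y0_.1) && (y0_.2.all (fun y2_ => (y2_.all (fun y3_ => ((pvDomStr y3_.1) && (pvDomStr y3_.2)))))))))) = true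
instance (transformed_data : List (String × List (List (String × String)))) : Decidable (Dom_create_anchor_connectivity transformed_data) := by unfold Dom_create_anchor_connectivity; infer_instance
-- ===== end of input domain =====

-- B replaces A's per-pair counter accumulation (defaultdicts + itertools.combinations + final
-- re-copy) with an anchor→read-id-set index: each pair's value is computed once, at first
-- encounter, as the size of the intersection of the two anchors' read sets, and written directly
-- into the nested result (objective: alternative; not measured faster).

-- read['read_id'] — KeyError (= the .getD fallback, never reached) excluded by Pre_; used by both ports
def pvReadId (read : List (String × String)) : String :=
  ((PySem.Dict.mk read).get? "read_id").getD ""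

-- ===== PORT A =====
def create_anchor_connectivity (transformed_data : List (String × List (List (String × String)))) : List (String × List (String × List (String × Int))) :=
  -- read_to_anchors = defaultdict(set); read_to_anchors[read['read_id']].add(anchor_id)
  let read_to_anchors : PySem.Dict String (PySem.Set String) :=
    transformed_data.foldl (fun d p =>
      p.2.foldl (fun d read =>
        d.modify (pvReadId read) PySem.Set.empty (fun s => PySem.Set.add s p.1)) d)
      PySem.Dict.empty
  -- connectivity = defaultdict(lambda: defaultdict(int)); combinations(sorted(...), 2)
  let connectivity : PySem.Dict String (PySem.Dict String Int) :=
    read_to_anchors.values.foldl (fun c anchors_set =>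
      if 1 < PySem.Set.len anchors_set then
        (PySem.List.combinations (PySem.List.sorted anchors_set (fun x => x) false) 2).foldl
          (fun c pair =>
            match pair with
            | [a1, a2] => c.modify a1 PySem.Dict.empty (fun inner => inner.modify a2 0 (· + 1))
            | _ => c) c
      else c)
      PySem.Dict.empty
  -- final_connectivity = defaultdict(dict); [anchor1][anchor2] = {"common_read_count": count}
  let final : PySem.Dict String (PySem.Dict String (List (String × Int))) :=
    connectivity.items.foldl (fun f pr =>
      pr.2.items.foldl (fun f qr =>
        f.modify pr.1 PySem.Dict.empty (fun inner => inner.insert qr.1 [("common_read_count", qr.2)])) f)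
      PySem.Dict.empty
  final.items.map (fun pr => (pr.1, pr.2.items))

-- ===== PORT B =====
def create_anchor_connectivity_alt (transformed_data : List (String × List (List (String × String)))) : List (String × List (String × List (String × Int))) :=
  -- single pass: anchor_reads.setdefault(anchor_id, set()).add(rid);
  --              read_anchors.setdefault(rid, []).append(anchor_id)
  let st : PySem.Dict String (PySem.Set String) × PySem.Dict String (List String) :=
    transformed_data.foldl (fun st p =>
      p.2.foldl (fun st read =>
        (st.1.modify p.1 PySem.Set.empty (fun s => PySem.Set.add s (pvReadId read)),
         st.2.modify (pvReadId read) [] (fun l => l ++ [p.1]))) st)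
      (PySem.Dict.empty, PySem.Dict.empty)
  let anchor_reads := st.1
  let read_anchors := st.2
  -- result.setdefault(a1, {}); if a2 not in inner:
  --   inner[a2] = {"common_read_count": len(anchor_reads[a1] & anchor_reads[a2])}
  -- (anchor_reads[a1]/[a2] never raise: a1, a2 come from a read's anchors, all indexed in pass 1;
  --  the .getD fallback is unreachable)
  let result : PySem.Dict String (PySem.Dict String (List (String × Int))) :=
    read_anchors.values.foldl (fun res anchors =>
      let uniq := PySem.List.sorted (PySem.Set.ofList anchors) (fun x => x) false
      (PySem.List.enumerate uniq).foldl (fun res ia =>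
        (PySem.List.slice uniq (some (ia.1 + 1)) none).foldl (fun res a2 =>
          res.modify ia.2 PySem.Dict.empty (fun inner =>
            if inner.contains a2 then inner
            else inner.insert a2 [("common_read_count",
              PySem.Set.len (PySem.Set.inter ((anchor_reads.get? ia.2).getD PySem.Set.empty)
                                             ((anchor_reads.get? a2).getD PySem.Set.empty)))])) res) res)
      PySem.Dict.empty
  result.items.map (fun pr => (pr.1, pr.2.items))

-- ===== PRECONDITION & SPEC =====
-- Pre_ excludes exactly the inputs where some read dict lacks the key "read_id": Python A raises KeyError there.
def Pre_create_anchor_connectivity (transformed_data : List (String × List (List (String × String)))) : Prop :=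
  (transformed_data.all (fun p => p.2.all (fun read => (PySem.Dict.mk read).contains "read_id"))) = true
instance (transformed_data : List (String × List (List (String × String)))) : Decidable (Pre_create_anchor_connectivity transformed_data) := by unfold Pre_create_anchor_connectivity; infer_instance
def pvWitness_create_anchor_connectivity : (List (String × List (List (String × String)))) :=
  [("a1", [[("read_id", "r1")], [("read_id", "r2")]]), ("a2", [[("read_id", "r1")]])]

def Spec_create_anchor_connectivity (transformed_data : List (String × List (List (String × String)))) (out : List (String × List (String × List (String × Int)))) : Prop := out = create_anchor_connectivity_alt transformed_data
instance (transformed_data : List (String × List (List (String × String)))) (out : List (String × List (String × List (String × Int)))) : Decidable (Spec_create_anchor_connectivity transformed_data out) := by unfold Spec_create_anchor_connectivity; infer_instance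

-- ===== CLAIM (what is proved, stated in full; the proofs are below) =====
def Claim_equal_create_anchor_connectivity : Prop := ∀ (transformed_data : List (String × List (List (String × String)))), Dom_create_anchor_connectivity transformed_data → Pre_create_anchor_connectivity transformed_data → Spec_create_anchor_connectivity transformed_data (create_anchor_connectivity transformed_data)

-- ===== LEMMAS AND PROOFS =====

-- ---------- proof-side definitions ----------

-- the stream of (read_id, anchor_id) events both single passes process
def pvEvents (td : List (String × List (List (String × String)))) : List (String × String) :=
  td.flatMap (fun p => p.2.map (fun read => (pvReadId read, p.1)))

-- read -> anchors dict (B's read_anchors, A's pre-set grouping)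
def pvRA (td : List (String × List (List (String × String)))) : PySem.Dict String (List String) :=
  (pvEvents td).foldl (fun d e => d.modify e.1 [] (fun l => l ++ [e.2])) PySem.Dict.empty

-- B's anchor -> set-of-read-ids dict
def pvAR (td : List (String × List (List (String × String)))) : PySem.Dict String (PySem.Set String) :=
  (pvEvents td).foldl (fun d e => d.modify e.2 PySem.Set.empty (fun s => PySem.Set.add s e.1)) PySem.Dict.empty

-- anchor -> (multi)list of read ids of its events
def pvW (td : List (String × List (List (String × String)))) (a : String) : List String :=
  ((pvEvents td).filter (fun e => e.2 == a)).map Prod.fst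

-- B's per-pair value: |reads(a1) ∩ reads(a2)|
def pvV (td : List (String × List (List (String × String)))) (a1 a2 : String) : Int :=
  PySem.Set.len (PySem.Set.inter (PySem.Set.ofList (pvW td a1)) (PySem.Set.ofList (pvW td a2)))

-- value-wise set(?) image of a read->list dict
def pvMapVals (d : PySem.Dict String (List String)) : PySem.Dict String (PySem.Set String) :=
  PySem.Dict.mk (d.items.map (fun p => (p.1, PySem.Set.ofList p.2)))

-- all ordered pairs (u[i], u[j]) with i < j
def pvSufPairs : List String → List (String × String)
  | [] => []
  | x :: xs => xs.map (fun y => (x, y)) ++ pvSufPairs xs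

-- the full pair stream both pair loops process
def pvPS (td : List (String × List (List (String × String)))) : List (String × String) :=
  (pvRA td).values.flatMap (fun l => pvSufPairs (PySem.List.sorted (PySem.Set.ofList l) (fun x => x) false))

-- second components of the pairs with first component a1
def pvSnds (ps : List (String × String)) (a1 : String) : List String :=
  (ps.filter (fun p => p.1 == a1)).map Prod.snd

def pvWrap (c : Int) : List (String × Int) := [("common_read_count", c)]

-- the canonical nested result, as a function of the pair stream and a value function
def pvC (ps : List (String × String)) : List (String × List (String × List (String × Int))) :=
  (PySem.List.dedup (ps.map Prod.fst)).map (fun a1 =>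
    (a1, (PySem.List.dedup (pvSnds ps a1)).map (fun a2 =>
      (a2, pvWrap ((pvSnds ps a1).count a2 : Int)))))

-- ---------- generic list/dedup lemmas ----------

theorem pv_dedup_append {α : Type} [BEq α] [LawfulBEq α] (l : List α) (x : α) :
    PySem.List.dedup (l ++ [x]) = if x ∈ l then PySem.List.dedup l else PySem.List.dedup l ++ [x] := by
  rw [PySem.List.dedup_eq_ofList, PySem.Set.ofList, List.foldl_append]
  show PySem.Set.add (PySem.Set.ofList l) x = _
  rw [PySem.Set.add, PySem.List.dedup_eq_ofList]
  have : (PySem.Set.ofList l).contains x = decide (x ∈ l) := by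
    rw [PySem.Set.contains]
    simp [PySem.Set.mem_ofList]
  rw [this]
  by_cases h : x ∈ l <;> simp [h]

theorem pv_mem_dedup {α : Type} [BEq α] [LawfulBEq α] (l : List α) (x : α) :
    x ∈ PySem.List.dedup l ↔ x ∈ l := by
  simp [PySem.List.dedup_eq_ofList, PySem.Set.mem_ofList]

theorem pv_nodup_dedup {α : Type} [BEq α] [LawfulBEq α] (l : List α) :
    (PySem.List.dedup l).Nodup := by
  simp [PySem.List.dedup_eq_ofList, PySem.Set.nodup_ofList]

theorem pv_dedup_of_nodup {α : Type} [BEq α] [LawfulBEq α] (l : List α) (h : l.Nodup) :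
    PySem.List.dedup l = l := by
  induction l using List.reverseRecOn with
  | nil => rfl
  | append_singleton l x ih =>
    rw [pv_dedup_append]
    rw [List.nodup_append] at h
    have hx : x ∉ l := fun hm => h.2.2 x hm x (List.mem_singleton_self x) rfl
    rw [if_neg hx, ih h.1]

theorem pv_count_snds (a1 x : String) (ps : List (String × String)) :
    ps.count (a1, x) = (pvSnds ps a1).count x := by
  induction ps with
  | nil => rfl
  | cons p ps ih =>
    obtain ⟨pa, pb⟩ := p
    by_cases h1 : pa = a1
    · subst h1
      by_cases h2 : pb = x
      · subst h2
        simp [pvSnds, ih]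
      · simp [pvSnds, ih, h2, Prod.ext_iff]
    · simp [pvSnds, ih, h1, Prod.ext_iff]

-- ---------- stage 1: the single-pass folds over the event stream ----------

theorem pv_nested_fold_eq {σ : Type} (td : List (String × List (List (String × String))))
    (F : σ → String → String → σ) (init : σ) :
    td.foldl (fun d p => p.2.foldl (fun d read => F d (pvReadId read) p.1) d) init
      = (pvEvents td).foldl (fun d e => F d e.1 e.2) init := by
  simp [pvEvents, List.foldl_flatMap, List.foldl_map]

theorem pv_prod_foldl {σ τ ε : Type} (f : σ → ε → σ) (g : τ → ε → τ) (l : List ε) :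
    ∀ (x : σ) (y : τ),
    l.foldl (fun st e => (f st.1 e, g st.2 e)) (x, y) = (l.foldl f x, l.foldl g y) := by
  induction l with
  | nil => intro x y; rfl
  | cons e l ih => intro x y; simp only [List.foldl_cons]; exact ih (f x e) (g y e)

theorem pv_mapVals_get? (d : PySem.Dict String (List String)) (k : String) :
    (pvMapVals d).get? k = (d.get? k).map (fun l => PySem.Set.ofList l) := by
  simp [pvMapVals, PySem.Dict.get?, List.find?_map, Function.comp_def, Option.map_map]

theorem pv_mapVals_contains (d : PySem.Dict String (List String)) (k : String) :
    (pvMapVals d).contains k = d.contains k := by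
  simp [pvMapVals, PySem.Dict.contains, List.any_map, Function.comp_def]

theorem pv_mapVals_insert (d : PySem.Dict String (List String)) (k : String) (v : List String) :
    pvMapVals (d.insert k v) = (pvMapVals d).insert k (PySem.Set.ofList v) := by
  rw [PySem.Dict.insert, PySem.Dict.insert, pv_mapVals_contains]
  by_cases h : d.contains k
  · rw [if_pos h, if_pos h]
    show pvMapVals _ = PySem.Dict.mk _
    rw [pvMapVals, pvMapVals]
    apply congrArg
    show (List.map _ d.items).map _ = (List.map _ (List.map _ d.items))
    rw [List.map_map, List.map_map]
    apply List.map_congr_left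
    intro p _
    by_cases hp : p.1 = k <;> simp [hp]
  · rw [if_neg h, if_neg h]
    show pvMapVals _ = PySem.Dict.mk _
    rw [pvMapVals, pvMapVals]
    simp

theorem pv_mapVals_modify (d : PySem.Dict String (List String)) (k a : String) :
    pvMapVals (d.modify k [] (fun l => l ++ [a]))
      = (pvMapVals d).modify k PySem.Set.empty (fun s => PySem.Set.add s a) := by
  rw [PySem.Dict.modify, PySem.Dict.modify]
  have hg : (pvMapVals d).getD k PySem.Set.empty = PySem.Set.ofList (d.getD k []) := by
    rw [PySem.Dict.getD, PySem.Dict.getD, pv_mapVals_get?]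
    cases d.get? k <;> rfl
  have hadd : PySem.Set.add (PySem.Set.ofList (d.getD k [])) a
      = PySem.Set.ofList (d.getD k [] ++ [a]) := by
    rw [PySem.Set.ofList, PySem.Set.ofList, List.foldl_append]
    rfl
  rw [hg, hadd, pv_mapVals_insert]

-- the read_to_anchors fold (A's stage 1) is pvMapVals of the grouping fold
theorem pv_stage1 (td : List (String × List (List (String × String)))) :
    td.foldl (fun d p =>
      p.2.foldl (fun d read =>
        d.modify (pvReadId read) PySem.Set.empty (fun s => PySem.Set.add s p.1)) d)
      PySem.Dict.empty = pvMapVals (pvRA td) := by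
  have key : ∀ (ev : List (String × String)) (d : PySem.Dict String (List String)),
      ev.foldl (fun d e => d.modify e.1 PySem.Set.empty (fun s => PySem.Set.add s e.2)) (pvMapVals d)
        = pvMapVals (ev.foldl (fun d e => d.modify e.1 [] (fun l => l ++ [e.2])) d) := by
    intro ev
    induction ev with
    | nil => intro d; rfl
    | cons e ev ih =>
      intro d
      simp only [List.foldl_cons]
      rw [← pv_mapVals_modify, ih]
  have heq := pv_nested_fold_eq td (fun d k a => d.modify k PySem.Set.empty (fun s => PySem.Set.add s a)) PySem.Dict.empty
  beta_reduce at heq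
  have h0 : (PySem.Dict.empty : PySem.Dict String (PySem.Set String)) = pvMapVals PySem.Dict.empty := rfl
  rw [heq, h0, key, pvRA]

-- B's anchor_reads fold is pvMapVals of the anchor-keyed grouping fold
theorem pv_AR_eq (td : List (String × List (List (String × String)))) :
    pvAR td = pvMapVals ((pvEvents td).foldl (fun d e => d.modify e.2 [] (fun l => l ++ [e.1])) PySem.Dict.empty) := by
  have key : ∀ (ev : List (String × String)) (d : PySem.Dict String (List String)),
      ev.foldl (fun d e => d.modify e.2 PySem.Set.empty (fun s => PySem.Set.add s e.1)) (pvMapVals d)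
        = pvMapVals (ev.foldl (fun d e => d.modify e.2 [] (fun l => l ++ [e.1])) d) := by
    intro ev
    induction ev with
    | nil => intro d; rfl
    | cons e ev ih =>
      intro d
      simp only [List.foldl_cons]
      rw [← pv_mapVals_modify, ih]
  have h0 : (PySem.Dict.empty : PySem.Dict String (PySem.Set String)) = pvMapVals PySem.Dict.empty := rfl
  rw [pvAR, h0, key]
  rfl

-- lookup in B's anchor index
theorem pv_AR_getD (td : List (String × List (List (String × String)))) (a : String) :
    ((pvAR td).get? a).getD PySem.Set.empty = PySem.Set.ofList (pvW td a) := by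
  have hgrp : ((pvEvents td).foldl (fun d e => d.modify e.2 [] (fun l => l ++ [e.1])) PySem.Dict.empty).getD a []
      = pvW td a := by
    have hmap : (pvEvents td).foldl (fun d e => d.modify e.2 [] (fun l => l ++ [e.1])) PySem.Dict.empty
        = ((pvEvents td).map Prod.swap).foldl (fun d p => d.modify p.1 [] (fun l => l ++ [p.2])) PySem.Dict.empty := by
      rw [List.foldl_map]
      rfl
    rw [hmap, PySem.Dict.getD_foldl_modify_append]
    simp [pvW, List.filter_map, List.map_map, Function.comp_def, Prod.swap]
  rw [pv_AR_eq, pv_mapVals_get?]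
  rw [PySem.Dict.getD_eq_get?_getD] at hgrp
  cases h : ((pvEvents td).foldl (fun d e => d.modify e.2 [] (fun l => l ++ [e.1])) PySem.Dict.empty).get? a with
  | none =>
    rw [h] at hgrp
    simp only [Option.getD_none] at hgrp
    simp [← hgrp, PySem.Set.empty]
  | some l =>
    rw [h] at hgrp
    simp only [Option.getD_some] at hgrp
    simp [hgrp]

-- read_anchors: keys and values characterised without induction
theorem pv_RA_getD (td : List (String × List (List (String × String)))) (r : String) :
    (pvRA td).getD r [] = pvSnds (pvEvents td) r := by
  rw [pvRA, PySem.Dict.getD_foldl_modify_append]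
  simp [pvSnds]

theorem pv_RA_values (td : List (String × List (List (String × String)))) :
    (pvRA td).values = (PySem.List.dedup ((pvEvents td).map Prod.fst)).map (fun r => pvSnds (pvEvents td) r) := by
  have hkeys : (pvRA td).keys = PySem.List.dedup ((pvEvents td).map Prod.fst) := by
    rw [pvRA]
    have := PySem.Dict.keys_foldl_modify_key (pvEvents td) Prod.fst [] (fun _ e l => l ++ [e.2]) PySem.Dict.empty
    rw [this]
    rw [PySem.List.dedup_eq_ofList]
    rfl
  have hnd : (pvRA td).keys.Nodup := by rw [hkeys]; exact pv_nodup_dedup _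
  rw [PySem.Dict.values_eq_map_keys _ hnd [], hkeys]
  apply List.map_congr_left
  intro r _
  exact pv_RA_getD td r

-- ---------- stage 2: pair generation ----------

theorem pv_comb2 (u : List String) :
    PySem.List.combinations u 2 = (pvSufPairs u).map (fun p => [p.1, p.2]) := by
  induction u with
  | nil => rfl
  | cons x xs ih =>
    rw [show (2 : Nat) = 1 + 1 from rfl, PySem.List.combinations_cons_succ,
      PySem.List.combinations_one]
    rw [show (1 : Nat) + 1 = 2 from rfl, ih]
    simp [pvSufPairs, List.map_map, Function.comp_def]

theorem pv_sufPairs_nil_of_short (u : List String) (h : u.length ≤ 1) : pvSufPairs u = [] := by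
  match u, h with
  | [], _ => rfl
  | [x], _ => rfl

theorem pv_enum_fold {σ : Type} (f : σ → String → String → σ) :
    ∀ (u : List String) (w : List String) (n : Nat), w.drop n = u → ∀ (s : σ),
    (PySem.List.enumerate u (n : Int)).foldl (fun s ia =>
        (PySem.List.slice w (some (ia.1 + 1)) none).foldl (fun s a2 => f s ia.2 a2) s) s
      = (pvSufPairs u).foldl (fun s p => f s p.1 p.2) s := by
  intro u
  induction u with
  | nil => intro w n _ s; rfl
  | cons x xs ih =>
    intro w n hw s
    have henum : PySem.List.enumerate (x :: xs) (n : Int) = ((n : Int), x) :: PySem.List.enumerate xs ((n : Int) + 1) := rfl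
    have hcast : ((n : Int) + 1) = ((n + 1 : Nat) : Int) := by push_cast; ring
    have hslice : PySem.List.slice w (some ((n : Int) + 1)) none = xs := by
      rw [PySem.List.slice_from w (by omega : (0:Int) ≤ (n : Int) + 1)]
      have : ((n : Int) + 1).toNat = n + 1 := by omega
      rw [this]
      rw [← List.drop_drop, hw]
      rfl
    rw [henum, List.foldl_cons]
    simp only [hslice]
    rw [hcast, ih w (n + 1) (by rw [← List.drop_drop, hw]; rfl)]
    rw [pvSufPairs]
    rw [List.foldl_append, List.foldl_map]

-- ---------- stage 3: A's counting loop ----------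

theorem pv_snds_append (ps : List (String × String)) (a1 a2 a : String) :
    pvSnds (ps ++ [(a1, a2)]) a = if a1 = a then pvSnds ps a ++ [a2] else pvSnds ps a := by
  by_cases h : a1 = a <;> simp [pvSnds, List.filter_append, h]

theorem pv_snds_nil_of_not_mem (ps : List (String × String)) (a1 : String)
    (h : a1 ∉ ps.map Prod.fst) : pvSnds ps a1 = [] := by
  simp only [pvSnds, List.map_eq_nil_iff, List.filter_eq_nil_iff]
  intro p hp hc
  exact h (List.mem_map.mpr ⟨p, hp, by simpa using hc⟩)

theorem pv_count_fold (ps : List (String × String)) :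
    ps.foldl (fun c p => c.modify p.1 PySem.Dict.empty (fun inner => inner.modify p.2 0 (· + 1)))
      PySem.Dict.empty
    = PySem.Dict.mk ((PySem.List.dedup (ps.map Prod.fst)).map
        (fun a1 => (a1, PySem.Dict.counter (pvSnds ps a1)))) := by
  induction ps using List.reverseRecOn with
  | nil => rfl
  | append_singleton ps p ih =>
    obtain ⟨a1, a2⟩ := p
    rw [List.foldl_append, List.foldl_cons, List.foldl_nil, ih]
    have hkeys : (PySem.Dict.mk ((PySem.List.dedup (ps.map Prod.fst)).map
        (fun a1 => (a1, PySem.Dict.counter (pvSnds ps a1))))).keys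
        = PySem.List.dedup (ps.map Prod.fst) := by
      simp [PySem.Dict.keys, Function.comp_def]
    have hmapfst : (ps ++ [(a1, a2)]).map Prod.fst = ps.map Prod.fst ++ [a1] := by
      simp
    rw [PySem.Dict.modify, hmapfst, pv_dedup_append]
    by_cases hmem : a1 ∈ ps.map Prod.fst
    · have hK1 : a1 ∈ PySem.List.dedup (ps.map Prod.fst) := (pv_mem_dedup _ _).mpr hmem
      have hcont : (PySem.Dict.mk ((PySem.List.dedup (ps.map Prod.fst)).map
          (fun a1 => (a1, PySem.Dict.counter (pvSnds ps a1))))).contains a1 = true := by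
        rw [PySem.Dict.contains_eq_decide_mem_keys, hkeys]
        simp only [decide_eq_true_eq]; exact hK1
      have hget : (PySem.Dict.mk ((PySem.List.dedup (ps.map Prod.fst)).map
          (fun a1 => (a1, PySem.Dict.counter (pvSnds ps a1))))).getD a1 PySem.Dict.empty
          = PySem.Dict.counter (pvSnds ps a1) := by
        apply PySem.Dict.getD_of_mem_items
        · exact List.mem_map.mpr ⟨a1, hK1, rfl⟩
        · rw [hkeys]; exact pv_nodup_dedup _
      rw [hget, if_pos hmem]
      apply PySem.Dict.ext
      rw [PySem.Dict.items_insert_of_contains _ _ hcont]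
      show (List.map _ _).map _ = _
      rw [List.map_map]
      apply List.map_congr_left
      intro a ha
      by_cases hax : a = a1
      · subst hax
        simp only [Function.comp_def, beq_self_eq_true, if_pos]
        rw [pv_snds_append, if_pos rfl, PySem.Dict.counter_append_singleton]
      · have : (a == a1) = false := by simpa using hax
        simp only [Function.comp_def, this, Bool.false_eq_true, if_false]
        rw [pv_snds_append, if_neg (fun hc => hax hc.symm)]
    · have hcont : (PySem.Dict.mk ((PySem.List.dedup (ps.map Prod.fst)).map
          (fun a1 => (a1, PySem.Dict.counter (pvSnds ps a1))))).contains a1 = false := by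
        rw [PySem.Dict.contains_eq_decide_mem_keys, hkeys]
        simp only [decide_eq_false_iff_not]
        exact fun hc => hmem ((pv_mem_dedup _ _).mp hc)
      have hget : (PySem.Dict.mk ((PySem.List.dedup (ps.map Prod.fst)).map
          (fun a1 => (a1, PySem.Dict.counter (pvSnds ps a1))))).getD a1 PySem.Dict.empty
          = PySem.Dict.empty := PySem.Dict.getD_of_not_contains _ _ hcont
      rw [hget, if_neg hmem]
      apply PySem.Dict.ext
      rw [PySem.Dict.items_insert_of_not_contains _ _ hcont]
      show (List.map _ _) ++ _ = (List.map _ _)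
      rw [List.map_append]
      congr 1
      · apply List.map_congr_left
        intro a ha
        have hax : a ≠ a1 := fun hc => hmem (hc ▸ (pv_mem_dedup _ _).mp ha)
        rw [pv_snds_append, if_neg (fun hc => hax hc.symm)]
      · rw [List.map_singleton, pv_snds_append, if_pos rfl,
          pv_snds_nil_of_not_mem ps a1 hmem]
        rfl

-- ---------- stage 3': B's direct nested build ----------

theorem pv_build (V : String → String → Int) (ps : List (String × String)) :
    ps.foldl (fun res p =>
        res.modify p.1 PySem.Dict.empty (fun inner =>
          if inner.contains p.2 then inner else inner.insert p.2 (pvWrap (V p.1 p.2))))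
      PySem.Dict.empty
    = PySem.Dict.mk ((PySem.List.dedup (ps.map Prod.fst)).map (fun a1 =>
        (a1, PySem.Dict.mk ((PySem.List.dedup (pvSnds ps a1)).map (fun a2 => (a2, pvWrap (V a1 a2))))))) := by
  induction ps using List.reverseRecOn with
  | nil => rfl
  | append_singleton ps p ih =>
    obtain ⟨a1, a2⟩ := p
    rw [List.foldl_append, List.foldl_cons, List.foldl_nil, ih]
    have hkeys : (PySem.Dict.mk ((PySem.List.dedup (ps.map Prod.fst)).map (fun a1 =>
        (a1, PySem.Dict.mk ((PySem.List.dedup (pvSnds ps a1)).map (fun a2 => (a2, pvWrap (V a1 a2)))))))).keys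
        = PySem.List.dedup (ps.map Prod.fst) := by
      simp [PySem.Dict.keys, Function.comp_def]
    have hmapfst : (ps ++ [(a1, a2)]).map Prod.fst = ps.map Prod.fst ++ [a1] := by simp
    have hinnerkeys : ∀ a : String,
        (PySem.Dict.mk ((PySem.List.dedup (pvSnds ps a)).map (fun a2 => (a2, pvWrap (V a a2))))).contains a2
          = decide (a2 ∈ PySem.List.dedup (pvSnds ps a)) := by
      intro a
      rw [PySem.Dict.contains_eq_decide_mem_keys]
      simp [PySem.Dict.keys, List.map_map, Function.comp_def]
    rw [PySem.Dict.modify, hmapfst, pv_dedup_append]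
    by_cases hmem : a1 ∈ ps.map Prod.fst
    · have hK1 : a1 ∈ PySem.List.dedup (ps.map Prod.fst) := (pv_mem_dedup _ _).mpr hmem
      have hcont : (PySem.Dict.mk ((PySem.List.dedup (ps.map Prod.fst)).map (fun a1 =>
          (a1, PySem.Dict.mk ((PySem.List.dedup (pvSnds ps a1)).map (fun a2 => (a2, pvWrap (V a1 a2)))))))).contains a1 = true := by
        rw [PySem.Dict.contains_eq_decide_mem_keys, hkeys]
        simp only [decide_eq_true_eq]; exact hK1
      have hget : (PySem.Dict.mk ((PySem.List.dedup (ps.map Prod.fst)).map (fun a1 =>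
          (a1, PySem.Dict.mk ((PySem.List.dedup (pvSnds ps a1)).map (fun a2 => (a2, pvWrap (V a1 a2)))))))).getD a1 PySem.Dict.empty
          = PySem.Dict.mk ((PySem.List.dedup (pvSnds ps a1)).map (fun a2 => (a2, pvWrap (V a1 a2)))) := by
        apply PySem.Dict.getD_of_mem_items
        · exact List.mem_map.mpr ⟨a1, hK1, rfl⟩
        · rw [hkeys]; exact pv_nodup_dedup _
      rw [hget, if_pos hmem, hinnerkeys a1]
      apply PySem.Dict.ext
      by_cases hin : a2 ∈ pvSnds ps a1
      · -- pair already present: the insert overwrites the a1 entry with itself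
        rw [if_pos (by simpa using (pv_mem_dedup _ _).mpr hin)]
        rw [PySem.Dict.items_insert_of_contains _ _ hcont]
        show (List.map _ _).map _ = _
        rw [List.map_map]
        apply List.map_congr_left
        intro a ha
        by_cases hax : a = a1
        · subst hax
          simp only [Function.comp_def, beq_self_eq_true, if_pos]
          rw [pv_snds_append, if_pos rfl, pv_dedup_append, if_pos hin]
        · have : (a == a1) = false := by simpa using hax
          simp only [Function.comp_def, this, Bool.false_eq_true, if_false]
          rw [pv_snds_append, if_neg (fun hc => hax hc.symm)]
      · -- new second key under an existing first key
        rw [if_neg (by simpa using fun hc => hin ((pv_mem_dedup _ _).mp hc))]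
        have hic : (PySem.Dict.mk ((PySem.List.dedup (pvSnds ps a1)).map (fun a2 => (a2, pvWrap (V a1 a2))))).contains a2 = false := by
          rw [hinnerkeys a1]
          simp only [decide_eq_false_iff_not]
          exact fun hc => hin ((pv_mem_dedup _ _).mp hc)
        have hinner : (PySem.Dict.mk ((PySem.List.dedup (pvSnds ps a1)).map (fun a2 => (a2, pvWrap (V a1 a2))))).insert a2 (pvWrap (V a1 a2))
            = PySem.Dict.mk ((PySem.List.dedup (pvSnds ps a1)).map (fun a2 => (a2, pvWrap (V a1 a2))) ++ [(a2, pvWrap (V a1 a2))]) := by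
          apply PySem.Dict.ext
          rw [PySem.Dict.items_insert_of_not_contains _ _ hic]
        rw [hinner, PySem.Dict.items_insert_of_contains _ _ hcont]
        show (List.map _ _).map _ = _
        rw [List.map_map]
        apply List.map_congr_left
        intro a ha
        by_cases hax : a = a1
        · subst hax
          simp only [Function.comp_def, beq_self_eq_true, if_pos]
          rw [pv_snds_append, if_pos rfl, pv_dedup_append, if_neg hin, List.map_append]
          rfl
        · have : (a == a1) = false := by simpa using hax
          simp only [Function.comp_def, this, Bool.false_eq_true, if_false]
          rw [pv_snds_append, if_neg (fun hc => hax hc.symm)]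
    · -- brand new first key: appended at the end with a one-entry inner dict
      have hcont : (PySem.Dict.mk ((PySem.List.dedup (ps.map Prod.fst)).map (fun a1 =>
          (a1, PySem.Dict.mk ((PySem.List.dedup (pvSnds ps a1)).map (fun a2 => (a2, pvWrap (V a1 a2)))))))).contains a1 = false := by
        rw [PySem.Dict.contains_eq_decide_mem_keys, hkeys]
        simp only [decide_eq_false_iff_not]
        exact fun hc => hmem ((pv_mem_dedup _ _).mp hc)
      have hget : (PySem.Dict.mk ((PySem.List.dedup (ps.map Prod.fst)).map (fun a1 =>
          (a1, PySem.Dict.mk ((PySem.List.dedup (pvSnds ps a1)).map (fun a2 => (a2, pvWrap (V a1 a2)))))))).getD a1 PySem.Dict.empty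
          = PySem.Dict.empty := PySem.Dict.getD_of_not_contains _ _ hcont
      have hsnil : pvSnds ps a1 = [] := pv_snds_nil_of_not_mem ps a1 hmem
      rw [hget, if_neg hmem]
      have hec : (PySem.Dict.empty : PySem.Dict String (List (String × Int))).contains a2 = false := rfl
      rw [hec]
      simp only [Bool.false_eq_true, if_false]
      apply PySem.Dict.ext
      rw [PySem.Dict.items_insert_of_not_contains _ _ hcont]
      show (List.map _ _) ++ _ = (List.map _ _)
      rw [List.map_append]
      congr 1
      · apply List.map_congr_left
        intro a ha
        have hax : a ≠ a1 := fun hc => hmem (hc ▸ (pv_mem_dedup _ _).mp ha)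
        rw [pv_snds_append, if_neg (fun hc => hax hc.symm)]
      · rw [List.map_singleton, pv_snds_append, if_pos rfl, hsnil, List.nil_append,
          pv_dedup_of_nodup [a2] (List.nodup_singleton a2)]
        rfl

-- ---------- stage 4: counting = intersection size ----------

theorem pv_mem_snds (ev : List (String × String)) (r a : String) :
    a ∈ pvSnds ev r ↔ (r, a) ∈ ev := by
  simp only [pvSnds, List.mem_map, List.mem_filter, beq_iff_eq]
  constructor
  · rintro ⟨p, ⟨hp, h1⟩, h2⟩
    have : p = (r, a) := Prod.ext h1 h2
    exact this ▸ hp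
  · intro h
    exact ⟨(r, a), ⟨h, rfl⟩, rfl⟩

theorem pv_mem_W (td : List (String × List (List (String × String)))) (r a : String) :
    r ∈ pvW td a ↔ (r, a) ∈ pvEvents td := by
  simp only [pvW, List.mem_map, List.mem_filter, beq_iff_eq]
  constructor
  · rintro ⟨p, ⟨hp, h2⟩, h1⟩
    have : p = (r, a) := Prod.ext h1 h2
    exact this ▸ hp
  · intro h
    exact ⟨(r, a), ⟨h, rfl⟩, rfl⟩

theorem pv_mem_sufPairs (u : List String) (p : String × String) :
    p ∈ pvSufPairs u → p.1 ∈ u ∧ p.2 ∈ u := by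
  induction u with
  | nil => intro h; exact absurd h (List.not_mem_nil)
  | cons x xs ih =>
    intro h
    rw [pvSufPairs, List.mem_append] at h
    rcases h with h | h
    · obtain ⟨y, hy, rfl⟩ := List.mem_map.mp h
      exact ⟨List.mem_cons_self, List.mem_cons_of_mem x hy⟩
    · obtain ⟨h1, h2⟩ := ih h
      exact ⟨List.mem_cons_of_mem x h1, List.mem_cons_of_mem x h2⟩

theorem pv_sufPairs_lt (u : List String) (hu : u.Pairwise (· < ·)) :
    ∀ p ∈ pvSufPairs u, p.1 < p.2 := by
  induction u with
  | nil => intro p h; exact absurd h (List.not_mem_nil)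
  | cons x xs ih =>
    intro p hp
    rw [pvSufPairs, List.mem_append] at hp
    rcases hp with h | h
    · obtain ⟨y, hy, rfl⟩ := List.mem_map.mp h
      exact (List.pairwise_cons.mp hu).1 y hy
    · exact ih (List.pairwise_cons.mp hu).2 p h

theorem pv_count_sufPairs (a1 a2 : String) (h12 : a1 < a2) :
    ∀ (u : List String), u.Pairwise (· < ·) →
    (pvSufPairs u).count (a1, a2) = if a1 ∈ u ∧ a2 ∈ u then 1 else 0 := by
  intro u
  induction u with
  | nil => intro _; simp [pvSufPairs]
  | cons x xs ih =>
    intro hu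
    obtain ⟨hx, hxs⟩ := List.pairwise_cons.mp hu
    have hnd : xs.Nodup := hxs.imp ne_of_lt
    have hxnot : x ∉ xs := fun hm => lt_irrefl x (hx x hm)
    rw [pvSufPairs, List.count_append]
    have hmapcnt : ∀ (ys : List String), (ys.map (fun y => (x, y))).count (a1, a2)
        = if x = a1 then ys.count a2 else 0 := by
      intro ys
      induction ys with
      | nil => simp
      | cons y ys ihy =>
        simp only [List.map_cons, List.count_cons, ihy]
        by_cases hxa : x = a1
        · subst hxa
          by_cases hy : y = a2
          · subst hy; simp
          · simp [hy, Prod.ext_iff]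
        · simp [hxa, Prod.ext_iff]
    by_cases hxa : x = a1
    · subst hxa
      have hrec : (pvSufPairs xs).count (x, a2) = 0 := by
        apply List.count_eq_zero_of_not_mem
        intro hm
        exact hxnot (pv_mem_sufPairs xs (x, a2) hm).1
      rw [hmapcnt xs, if_pos rfl, hrec]
      by_cases ha2 : a2 ∈ xs
      · rw [List.count_eq_one_of_mem hnd ha2,
          if_pos ⟨List.mem_cons_self, List.mem_cons_of_mem x ha2⟩]
      · rw [List.count_eq_zero_of_not_mem ha2, if_neg]
        rintro ⟨-, hm2⟩
        rcases List.mem_cons.mp hm2 with h | h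
        · exact absurd (h ▸ h12) (lt_irrefl x)
        · exact ha2 h
    · rw [hmapcnt xs, if_neg hxa, Nat.zero_add, ih hxs]
      by_cases ha1 : a1 ∈ xs
      · have ha2x : a2 ≠ x := by
          intro h
          exact absurd (h ▸ h12) (not_lt_of_gt (hx a1 ha1))
        have : (a1 ∈ x :: xs ∧ a2 ∈ x :: xs) ↔ (a1 ∈ xs ∧ a2 ∈ xs) := by
          constructor
          · rintro ⟨h1, h2⟩
            refine ⟨ha1, ?_⟩
            rcases List.mem_cons.mp h2 with h | h
            · exact absurd h ha2x
            · exact h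
          · rintro ⟨h1, h2⟩
            exact ⟨List.mem_cons_of_mem x h1, List.mem_cons_of_mem x h2⟩
        by_cases hc : a1 ∈ xs ∧ a2 ∈ xs
        · rw [if_pos hc, if_pos (this.mpr hc)]
        · rw [if_neg hc, if_neg (fun h => hc (this.mp h))]
      · have h1' : a1 ∉ (x :: xs) := by
          intro h
          rcases List.mem_cons.mp h with h | h
          · exact hxa h.symm
          · exact ha1 h
        rw [if_neg (fun h => ha1 h.1), if_neg (fun h => h1' h.1)]

theorem pv_count_flatMap {α β : Type} [BEq β] [LawfulBEq β] (g : α → List β) (x : β) :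
    ∀ (l : List α), (l.flatMap g).count x = (l.map (fun b => (g b).count x)).sum := by
  intro l
  induction l with
  | nil => rfl
  | cons b l ih => simp [List.count_append, ih]

theorem pv_sum_ite_countP {α : Type} (p : α → Prop) [DecidablePred p] :
    ∀ (l : List α), (l.map (fun b => if p b then 1 else 0)).sum = l.countP (fun b => decide (p b)) := by
  intro l
  induction l with
  | nil => rfl
  | cons b l ih =>
    rw [List.map_cons, List.sum_cons, List.countP_cons, ih]
    by_cases h : p b <;> simp [h, Nat.add_comm]

-- the key identity: B's intersection size equals A's accumulated pair count
theorem pv_V_eq_count (td : List (String × List (List (String × String)))) (a1 a2 : String)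
    (h12 : a1 < a2) :
    pvV td a1 a2 = (((pvPS td).count (a1, a2) : Nat) : Int) := by
  -- the pair-stream count, as a countP over the distinct read ids
  have hcount : (pvPS td).count (a1, a2)
      = (PySem.List.dedup ((pvEvents td).map Prod.fst)).countP
          (fun r => decide ((r, a1) ∈ pvEvents td ∧ (r, a2) ∈ pvEvents td)) := by
    rw [pvPS, pv_count_flatMap, pv_RA_values, List.map_map]
    have hblock : ∀ r : String,
        (pvSufPairs (PySem.List.sorted (PySem.Set.ofList (pvSnds (pvEvents td) r)) (fun x => x) false)).count (a1, a2)
          = if (r, a1) ∈ pvEvents td ∧ (r, a2) ∈ pvEvents td then 1 else 0 := by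
      intro r
      rw [pv_count_sufPairs a1 a2 h12 _ (PySem.List.sorted_ofList_pairwise_lt _)]
      by_cases hc : (r, a1) ∈ pvEvents td ∧ (r, a2) ∈ pvEvents td
      · rw [if_pos, if_pos hc]
        constructor <;> rw [PySem.List.mem_sorted, PySem.Set.mem_ofList, pv_mem_snds]
        · exact hc.1
        · exact hc.2
      · rw [if_neg, if_neg hc]
        rw [not_and_or] at hc ⊢
        rcases hc with h | h
        · exact Or.inl (by rw [PySem.List.mem_sorted, PySem.Set.mem_ofList, pv_mem_snds]; exact h)
        · exact Or.inr (by rw [PySem.List.mem_sorted, PySem.Set.mem_ofList, pv_mem_snds]; exact h)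
    have : ((PySem.List.dedup ((pvEvents td).map Prod.fst)).map
        ((fun l => (pvSufPairs (PySem.List.sorted (PySem.Set.ofList l) (fun x => x) false)).count (a1, a2)) ∘ (fun r => pvSnds (pvEvents td) r)))
        = (PySem.List.dedup ((pvEvents td).map Prod.fst)).map
          (fun r => if (r, a1) ∈ pvEvents td ∧ (r, a2) ∈ pvEvents td then 1 else 0) := by
      apply List.map_congr_left
      intro r _
      exact hblock r
    rw [Function.comp_def] at this ⊢
    rw [this, pv_sum_ite_countP]
  -- the intersection size, as a countP over the distinct a1-read ids
  have hV : pvV td a1 a2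
      = (((PySem.Set.ofList (pvW td a1)).filter
            (fun r => (PySem.Set.ofList (pvW td a2)).contains r)).length : Int) := by
    rw [pvV, PySem.Set.inter, PySem.Set.len]
  -- the two filtered lists are permutations (both nodup, same members)
  have hperm : ((PySem.Set.ofList (pvW td a1)).filter
        (fun r => (PySem.Set.ofList (pvW td a2)).contains r)).Perm
      ((PySem.List.dedup ((pvEvents td).map Prod.fst)).filter
        (fun r => decide ((r, a1) ∈ pvEvents td ∧ (r, a2) ∈ pvEvents td))) := by
    rw [List.perm_ext_iff_of_nodup (PySem.Set.nodup_ofList _ |>.filter _)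
      ((pv_nodup_dedup _).filter _)]
    intro r
    simp only [List.mem_filter, PySem.Set.mem_ofList, pv_mem_dedup, decide_eq_true_eq]
    constructor
    · rintro ⟨h1, h2⟩
      have h2' : r ∈ pvW td a2 := by
        have := PySem.Set.contains_iff (PySem.Set.ofList (pvW td a2)) r |>.mp h2
        rwa [PySem.Set.mem_ofList] at this
      refine ⟨?_, (pv_mem_W td r a1).mp h1, (pv_mem_W td r a2).mp h2'⟩
      exact List.mem_map.mpr ⟨(r, a1), (pv_mem_W td r a1).mp h1, rfl⟩
    · rintro ⟨-, h1, h2⟩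
      refine ⟨(pv_mem_W td r a1).mpr h1, ?_⟩
      rw [show ((PySem.Set.ofList (pvW td a2)).contains r = true)
          ↔ r ∈ PySem.Set.ofList (pvW td a2) from PySem.Set.contains_iff _ _,
        PySem.Set.mem_ofList]
      exact (pv_mem_W td r a2).mpr h2
  rw [hV, hperm.length_eq, hcount, List.countP_eq_length_filter]

-- membership in the pair stream gives a1 < a2
theorem pv_PS_lt (td : List (String × List (List (String × String)))) (p : String × String)
    (hp : p ∈ pvPS td) : p.1 < p.2 := by
  rw [pvPS, List.mem_flatMap] at hp
  obtain ⟨l, _, hpl⟩ := hp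
  exact pv_sufPairs_lt _ (PySem.List.sorted_ofList_pairwise_lt _) p hpl

-- ---------- stage 5: the final-copy loop of A ----------

theorem pv_regroup (q : List ((String × String) × Int)) (hnd : (q.map Prod.fst).Nodup) :
    q.foldl (fun res e =>
        res.modify e.1.1 PySem.Dict.empty (fun inner => inner.insert e.1.2 (pvWrap e.2)))
      PySem.Dict.empty
    = PySem.Dict.mk ((PySem.List.dedup (q.map (fun e => e.1.1))).map (fun a1 =>
        (a1, PySem.Dict.mk ((q.filter (fun e => e.1.1 == a1)).map (fun e => (e.1.2, pvWrap e.2)))))) := by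
  induction q using List.reverseRecOn with
  | nil => rfl
  | append_singleton q e ih =>
    obtain ⟨⟨a1, a2⟩, c⟩ := e
    rw [List.map_append] at hnd
    have hq : (q.map Prod.fst).Nodup := (List.nodup_append.mp hnd).1
    have hfresh : (a1, a2) ∉ q.map Prod.fst := by
      intro hm
      exact (List.nodup_append.mp hnd).2.2 (a1, a2) hm (a1, a2) (by simp) rfl
    rw [List.foldl_append, List.foldl_cons, List.foldl_nil, ih hq]
    have hkeys : (PySem.Dict.mk ((PySem.List.dedup (q.map (fun e => e.1.1))).map (fun a1 =>
        (a1, PySem.Dict.mk ((q.filter (fun e => e.1.1 == a1)).map (fun e => (e.1.2, pvWrap e.2))))))).keys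
        = PySem.List.dedup (q.map (fun e => e.1.1)) := by
      simp [PySem.Dict.keys, Function.comp_def]
    have hmapfst : (q ++ [((a1, a2), c)]).map (fun e => e.1.1) = q.map (fun e => e.1.1) ++ [a1] := by
      simp
    have hfilter : ∀ a : String, (q ++ [((a1, a2), c)]).filter (fun e => e.1.1 == a)
        = q.filter (fun e => e.1.1 == a) ++ if a1 = a then [((a1, a2), c)] else [] := by
      intro a
      by_cases h : a1 = a <;> simp [List.filter_append, h]
    rw [PySem.Dict.modify, hmapfst, pv_dedup_append]
    by_cases hmem : a1 ∈ q.map (fun e => e.1.1)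
    · have hK1 : a1 ∈ PySem.List.dedup (q.map (fun e => e.1.1)) := (pv_mem_dedup _ _).mpr hmem
      have hcont : (PySem.Dict.mk ((PySem.List.dedup (q.map (fun e => e.1.1))).map (fun a1 =>
          (a1, PySem.Dict.mk ((q.filter (fun e => e.1.1 == a1)).map (fun e => (e.1.2, pvWrap e.2))))))).contains a1 = true := by
        rw [PySem.Dict.contains_eq_decide_mem_keys, hkeys]
        simp only [decide_eq_true_eq]; exact hK1
      have hget : (PySem.Dict.mk ((PySem.List.dedup (q.map (fun e => e.1.1))).map (fun a1 =>
          (a1, PySem.Dict.mk ((q.filter (fun e => e.1.1 == a1)).map (fun e => (e.1.2, pvWrap e.2))))))).getD a1 PySem.Dict.empty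
          = PySem.Dict.mk ((q.filter (fun e => e.1.1 == a1)).map (fun e => (e.1.2, pvWrap e.2))) := by
        apply PySem.Dict.getD_of_mem_items
        · exact List.mem_map.mpr ⟨a1, hK1, rfl⟩
        · rw [hkeys]; exact pv_nodup_dedup _
      have hinner_nc : (PySem.Dict.mk ((q.filter (fun e => e.1.1 == a1)).map
          (fun e => (e.1.2, pvWrap e.2)))).contains a2 = false := by
        rw [PySem.Dict.contains_eq_decide_mem_keys]
        simp only [decide_eq_false_iff_not, PySem.Dict.keys, List.map_map]
        intro hm
        obtain ⟨e', he', he2⟩ := List.mem_map.mp hm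
        have hf := List.mem_filter.mp he'
        have : e'.1 = (a1, a2) := by
          have h1 : e'.1.1 = a1 := by simpa using hf.2
          exact Prod.ext h1 (by simpa using he2)
        exact hfresh (this ▸ List.mem_map_of_mem hf.1)
      have hinner : (PySem.Dict.mk ((q.filter (fun e => e.1.1 == a1)).map
          (fun e => (e.1.2, pvWrap e.2)))).insert a2 (pvWrap c)
          = PySem.Dict.mk ((q.filter (fun e => e.1.1 == a1)).map (fun e => (e.1.2, pvWrap e.2))
              ++ [(a2, pvWrap c)]) := by
        apply PySem.Dict.ext
        rw [PySem.Dict.items_insert_of_not_contains _ _ hinner_nc]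
      rw [hget, if_pos hmem, hinner]
      apply PySem.Dict.ext
      rw [PySem.Dict.items_insert_of_contains _ _ hcont]
      show (List.map _ _).map _ = _
      rw [List.map_map]
      apply List.map_congr_left
      intro a ha
      by_cases hax : a = a1
      · subst hax
        simp only [Function.comp_def, beq_self_eq_true, if_pos]
        rw [hfilter, if_pos rfl]
        simp
      · have hbe : (a == a1) = false := by simpa using hax
        simp only [Function.comp_def, hbe, Bool.false_eq_true, if_false]
        rw [hfilter, if_neg (fun hc => hax hc.symm), List.append_nil]
    · have hcont : (PySem.Dict.mk ((PySem.List.dedup (q.map (fun e => e.1.1))).map (fun a1 =>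
          (a1, PySem.Dict.mk ((q.filter (fun e => e.1.1 == a1)).map (fun e => (e.1.2, pvWrap e.2))))))).contains a1 = false := by
        rw [PySem.Dict.contains_eq_decide_mem_keys, hkeys]
        simp only [decide_eq_false_iff_not]
        exact fun hc => hmem ((pv_mem_dedup _ _).mp hc)
      have hget : (PySem.Dict.mk ((PySem.List.dedup (q.map (fun e => e.1.1))).map (fun a1 =>
          (a1, PySem.Dict.mk ((q.filter (fun e => e.1.1 == a1)).map (fun e => (e.1.2, pvWrap e.2))))))).getD a1 PySem.Dict.empty
          = PySem.Dict.empty := PySem.Dict.getD_of_not_contains _ _ hcont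
      have hfnil : q.filter (fun e => e.1.1 == a1) = [] := by
        rw [List.filter_eq_nil_iff]
        intro e' he' hc
        exact hmem (List.mem_map.mpr ⟨e', he', by simpa using hc⟩)
      rw [hget, if_neg hmem]
      apply PySem.Dict.ext
      rw [PySem.Dict.items_insert_of_not_contains _ _ hcont]
      show (List.map _ _) ++ _ = (List.map _ _)
      rw [List.map_append]
      congr 1
      · apply List.map_congr_left
        intro a ha
        have hax : a ≠ a1 := fun hc => hmem (hc ▸ (pv_mem_dedup _ _).mp ha)
        rw [hfilter, if_neg (fun hc => hax hc.symm), List.append_nil]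
      · rw [List.map_singleton, hfilter, if_pos rfl, hfnil]
        rfl

-- ---------- stage 6: assembling pipeline A ----------

-- flattened items of A's nested count dict
def pvQA (ps : List (String × String)) : List ((String × String) × Int) :=
  (PySem.List.dedup (ps.map Prod.fst)).flatMap (fun a1 =>
    (PySem.List.dedup (pvSnds ps a1)).map (fun a2 =>
      ((a1, a2), ((pvSnds ps a1).count a2 : Int))))

theorem pv_add_add_self {α : Type} [BEq α] [LawfulBEq α] (s : PySem.Set α) (a : α) :
    (s.add a).add a = s.add a := by
  have hmem : a ∈ s.add a := (PySem.Set.mem_add s a a).mpr (Or.inr rfl)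
  have hc : (s.add a).contains a = true := by
    rw [PySem.Set.contains]; simp [hmem]
  show (if (s.add a).contains a = true then s.add a else s.add a ++ [a]) = s.add a
  rw [hc]
  simp

theorem pv_fold_add_const {α β : Type} [BEq α] [LawfulBEq α] (a : α) :
    ∀ (m : List β), m ≠ [] → ∀ (s : PySem.Set α),
    (m.map (fun _ => a)).foldl PySem.Set.add s = s.add a := by
  intro m
  induction m with
  | nil => intro h; exact absurd rfl h
  | cons x t ih =>
    intro _ s
    simp only [List.map_cons, List.foldl_cons]
    cases t with
    | nil => rfl
    | cons y u =>
      rw [ih (by simp), pv_add_add_self]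

theorem pv_dedup_blocks (K : List String) (S : String → List String)
    (hK : K.Nodup) (hS : ∀ a ∈ K, S a ≠ []) :
    PySem.List.dedup (K.flatMap (fun a => (S a).map (fun _ => a))) = K := by
  have key : ∀ (K' : List String), (∀ a ∈ K', S a ≠ []) → ∀ (s : PySem.Set String),
      K'.foldl (fun s a => ((S a).map (fun _ => a)).foldl PySem.Set.add s) s
        = K'.foldl PySem.Set.add s := by
    intro K'
    induction K' with
    | nil => intro _ s; rfl
    | cons a K' ih =>
      intro h s
      simp only [List.foldl_cons]
      rw [pv_fold_add_const a _ (h a (by simp)), ih (fun b hb => h b (by simp [hb]))]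
  rw [PySem.List.dedup_eq_ofList, PySem.Set.ofList, List.foldl_flatMap, key K hS]
  have : (List.foldl PySem.Set.add PySem.Set.empty K) = PySem.Set.ofList K := rfl
  rw [this, ← PySem.List.dedup_eq_ofList, pv_dedup_of_nodup K hK]

theorem pv_filter_blocks {ν : Type} (T : String → List ((String × String) × ν))
    (hT : ∀ a, ∀ e ∈ T a, e.1.1 = a) :
    ∀ (K : List String), K.Nodup → ∀ a1, a1 ∈ K →
    (K.flatMap (fun a => T a)).filter (fun e => e.1.1 == a1) = T a1 := by
  intro K
  induction K with
  | nil => intro _ a1 h; exact absurd h (List.not_mem_nil)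
  | cons a K ih =>
    intro hK a1 ha1
    rw [List.flatMap_cons, List.filter_append]
    rcases List.mem_cons.mp ha1 with rfl | hmem
    · have hall : (T a1).filter (fun e => e.1.1 == a1) = T a1 :=
        List.filter_eq_self.mpr (fun e he => by simp [hT a1 e he])
      have hrest : (K.flatMap (fun a => T a)).filter (fun e => e.1.1 == a1) = [] := by
        rw [List.filter_eq_nil_iff]
        intro e he hc
        obtain ⟨b, hb, heb⟩ := List.mem_flatMap.mp he
        have h1 : e.1.1 = b := hT b e heb
        have h2 : e.1.1 = a1 := by simpa using hc
        exact (List.nodup_cons.mp hK).1 ((h1.symm.trans h2) ▸ hb)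
      rw [hall, hrest, List.append_nil]
    · have hna : (T a).filter (fun e => e.1.1 == a1) = [] := by
        rw [List.filter_eq_nil_iff]
        intro e he hc
        have h1 : e.1.1 = a := hT a e he
        have h2 : e.1.1 = a1 := by simpa using hc
        exact (List.nodup_cons.mp hK).1 ((h1.symm.trans h2) ▸ hmem)
      rw [hna, List.nil_append]
      exact ih (List.nodup_cons.mp hK).2 a1 hmem

theorem pv_nodup_pairs (S : String → List String) (hS : ∀ a, (S a).Nodup) :
    ∀ (K : List String), K.Nodup →
    (K.flatMap (fun a1 => (S a1).map (fun a2 => (a1, a2)))).Nodup := by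
  intro K
  induction K with
  | nil => intro _; simp
  | cons a K ih =>
    intro hK
    rw [List.flatMap_cons]
    apply List.Nodup.append
    · exact (hS a).map (fun x y h => by injection h)
    · exact ih (List.nodup_cons.mp hK).2
    · intro p hp hq
      obtain ⟨a2, _, rfl⟩ := List.mem_map.mp hp
      obtain ⟨b, hb, hpb⟩ := List.mem_flatMap.mp hq
      obtain ⟨b2, _, heq⟩ := List.mem_map.mp hpb
      have : b = a := congrArg Prod.fst heq
      exact (List.nodup_cons.mp hK).1 (this ▸ hb)

theorem pv_double_fold (L : List (String × PySem.Dict String Int))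
    (init : PySem.Dict String (PySem.Dict String (List (String × Int)))) :
    L.foldl (fun f pr =>
        pr.2.items.foldl (fun f qr =>
          f.modify pr.1 PySem.Dict.empty (fun inner => inner.insert qr.1 (pvWrap qr.2))) f) init
      = (L.flatMap (fun pr => pr.2.items.map (fun qr => ((pr.1, qr.1), qr.2)))).foldl
          (fun f e => f.modify e.1.1 PySem.Dict.empty (fun inner => inner.insert e.1.2 (pvWrap e.2))) init := by
  rw [List.foldl_flatMap]
  simp [List.foldl_map]

theorem pv_per_value (c : PySem.Dict String (PySem.Dict String Int)) (s : PySem.Set String) :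
    (if 1 < PySem.Set.len s then
        (PySem.List.combinations (PySem.List.sorted s (fun x => x) false) 2).foldl
          (fun c pair =>
            match pair with
            | [a1, a2] => c.modify a1 PySem.Dict.empty (fun inner => inner.modify a2 0 (· + 1))
            | _ => c) c
      else c)
    = (pvSufPairs (PySem.List.sorted s (fun x => x) false)).foldl
        (fun c p => c.modify p.1 PySem.Dict.empty (fun inner => inner.modify p.2 0 (· + 1))) c := by
  by_cases h : 1 < PySem.Set.len s
  · rw [if_pos h, pv_comb2, List.foldl_map]
  · have hlen : (PySem.List.sorted s (fun x => x) false).length ≤ 1 := by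
      rw [PySem.List.length_sorted]
      rw [PySem.Set.len_eq] at h
      omega
    rw [if_neg h, pv_sufPairs_nil_of_short _ hlen]
    rfl

theorem pv_out (q : List ((String × String) × Int)) :
    (PySem.Dict.mk ((PySem.List.dedup (q.map (fun e => e.1.1))).map (fun a1 =>
        (a1, PySem.Dict.mk ((q.filter (fun e => e.1.1 == a1)).map
          (fun e => (e.1.2, pvWrap e.2))))))).items.map (fun pr => (pr.1, pr.2.items))
    = (PySem.List.dedup (q.map (fun e => e.1.1))).map (fun a1 =>
        (a1, (q.filter (fun e => e.1.1 == a1)).map (fun e => (e.1.2, pvWrap e.2)))) := by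
  show (List.map _ _).map _ = _
  rw [List.map_map]
  rfl

theorem pv_nodup_QA (ps : List (String × String)) : ((pvQA ps).map Prod.fst).Nodup := by
  have h : (pvQA ps).map Prod.fst
      = (PySem.List.dedup (ps.map Prod.fst)).flatMap (fun a1 =>
          (PySem.List.dedup (pvSnds ps a1)).map (fun a2 => (a1, a2))) := by
    simp [pvQA, List.map_flatMap, List.map_map, Function.comp_def]
  rw [h]
  exact pv_nodup_pairs _ (fun a => pv_nodup_dedup _) _ (pv_nodup_dedup _)

theorem pv_final_A (ps : List (String × String)) :
    (PySem.List.dedup ((pvQA ps).map (fun e => e.1.1))).map (fun a1 =>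
        (a1, ((pvQA ps).filter (fun e => e.1.1 == a1)).map (fun e => (e.1.2, pvWrap e.2))))
      = pvC ps := by
  have hkeymap : (pvQA ps).map (fun e => e.1.1)
      = (PySem.List.dedup (ps.map Prod.fst)).flatMap (fun a1 =>
          (PySem.List.dedup (pvSnds ps a1)).map (fun _ => a1)) := by
    simp [pvQA, List.map_flatMap, List.map_map, Function.comp_def]
  have hne : ∀ a ∈ PySem.List.dedup (ps.map Prod.fst), PySem.List.dedup (pvSnds ps a) ≠ [] := by
    intro a ha
    obtain ⟨p, hp, hfst⟩ := List.mem_map.mp ((pv_mem_dedup _ _).mp ha)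
    have hmem : p.2 ∈ pvSnds ps a :=
      List.mem_map.mpr ⟨p, List.mem_filter.mpr ⟨hp, by simp [hfst]⟩, rfl⟩
    exact List.ne_nil_of_mem ((pv_mem_dedup _ _).mpr hmem)
  have hkeys : PySem.List.dedup ((pvQA ps).map (fun e => e.1.1))
      = PySem.List.dedup (ps.map Prod.fst) := by
    rw [hkeymap]
    exact pv_dedup_blocks _ _ (pv_nodup_dedup _) hne
  rw [hkeys, pvC]
  apply List.map_congr_left
  intro a1 ha1
  have hfilter : (pvQA ps).filter (fun e => e.1.1 == a1)
      = (PySem.List.dedup (pvSnds ps a1)).map (fun a2 =>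
          ((a1, a2), ((pvSnds ps a1).count a2 : Int))) := by
    exact pv_filter_blocks
      (fun a => (PySem.List.dedup (pvSnds ps a)).map (fun a2 =>
        ((a, a2), ((pvSnds ps a).count a2 : Int))))
      (by
        intro a e he
        obtain ⟨a2, _, rfl⟩ := List.mem_map.mp he
        rfl)
      _ (pv_nodup_dedup _) a1 ha1
  rw [hfilter, List.map_map]
  rfl

theorem pv_A_result (td : List (String × List (List (String × String)))) :
    create_anchor_connectivity td = pvC (pvPS td) := by
  have hw : ∀ c : Int, [("common_read_count", c)] = pvWrap c := fun _ => rfl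
  simp only [create_anchor_connectivity]
  simp only [hw]
  rw [pv_stage1]
  have hvals : (pvMapVals (pvRA td)).values = (pvRA td).values.map (fun l => PySem.Set.ofList l) := by
    simp [pvMapVals, PySem.Dict.values]
  rw [hvals, List.foldl_map]
  have hfn : (fun (c : PySem.Dict String (PySem.Dict String Int)) (l : List String) =>
        if 1 < PySem.Set.len (PySem.Set.ofList l) then
          (PySem.List.combinations (PySem.List.sorted (PySem.Set.ofList l) (fun x => x) false) 2).foldl
            (fun c pair =>
              match pair with
              | [a1, a2] => c.modify a1 PySem.Dict.empty (fun inner => inner.modify a2 0 (· + 1))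
              | _ => c) c
        else c)
      = (fun c l => (pvSufPairs (PySem.List.sorted (PySem.Set.ofList l) (fun x => x) false)).foldl
          (fun c p => c.modify p.1 PySem.Dict.empty (fun inner => inner.modify p.2 0 (· + 1))) c) := by
    funext c l
    exact pv_per_value c (PySem.Set.ofList l)
  rw [hfn, ← List.foldl_flatMap]
  rw [show ((pvRA td).values.flatMap
      (fun l => pvSufPairs (PySem.List.sorted (PySem.Set.ofList l) (fun x => x) false))) = pvPS td from rfl]
  rw [pv_count_fold, pv_double_fold]
  have hflat : ((PySem.List.dedup ((pvPS td).map Prod.fst)).map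
        (fun a1 => (a1, PySem.Dict.counter (pvSnds (pvPS td) a1)))).flatMap
        (fun pr => pr.2.items.map (fun qr => ((pr.1, qr.1), qr.2)))
      = pvQA (pvPS td) := by
    rw [List.flatMap_map]
    simp [pvQA, PySem.Dict.items_counter, List.map_map, Function.comp_def]
  rw [hflat, pv_regroup _ (pv_nodup_QA _), pv_out, pv_final_A]

-- ---------- stage 7: assembling pipeline B ----------

theorem pv_B_result (td : List (String × List (List (String × String)))) :
    create_anchor_connectivity_alt td = pvC (pvPS td) := by
  simp only [create_anchor_connectivity_alt]
  -- stage 1: the nested pair-state fold is (pvAR td, pvRA td)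
  have h1 := pv_nested_fold_eq td
    (fun (st : PySem.Dict String (PySem.Set String) × PySem.Dict String (List String)) r a =>
      (st.1.modify a PySem.Set.empty (fun s => PySem.Set.add s r),
       st.2.modify r [] (fun l => l ++ [a])))
    (PySem.Dict.empty, PySem.Dict.empty)
  beta_reduce at h1
  rw [h1, pv_prod_foldl
    (fun (d : PySem.Dict String (PySem.Set String)) (e : String × String) =>
      d.modify e.2 PySem.Set.empty (fun s => PySem.Set.add s e.1))
    (fun (d : PySem.Dict String (List String)) (e : String × String) =>
      d.modify e.1 [] (fun l => l ++ [e.2]))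
    (pvEvents td) PySem.Dict.empty PySem.Dict.empty]
  rw [show ((pvEvents td).foldl (fun d e => d.modify e.2 PySem.Set.empty (fun s => PySem.Set.add s e.1)) PySem.Dict.empty) = pvAR td from rfl]
  rw [show ((pvEvents td).foldl (fun d e => d.modify e.1 [] (fun l => l ++ [e.2])) PySem.Dict.empty) = pvRA td from rfl]
  -- the loop value function is pvV
  have hV : ∀ a1 a2 : String,
      PySem.Set.len (PySem.Set.inter (((pvAR td).get? a1).getD PySem.Set.empty)
                                     (((pvAR td).get? a2).getD PySem.Set.empty))
        = pvV td a1 a2 := by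
    intro a1 a2
    rw [pv_AR_getD, pv_AR_getD, pvV]
  simp only [hV]
  have hwrap : ∀ (a1 a2 : String), [("common_read_count", pvV td a1 a2)] = pvWrap (pvV td a1 a2) :=
    fun _ _ => rfl
  simp only [hwrap]
  -- the pair loop over each read's sorted distinct anchors is a fold over pvSufPairs
  have hfnB : (fun (res : PySem.Dict String (PySem.Dict String (List (String × Int)))) (anchors : List String) =>
        (PySem.List.enumerate (PySem.List.sorted (PySem.Set.ofList anchors) (fun x => x) false)).foldl
          (fun res ia =>
            (PySem.List.slice (PySem.List.sorted (PySem.Set.ofList anchors) (fun x => x) false)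
                (some (ia.1 + 1)) none).foldl
              (fun res a2 =>
                res.modify ia.2 PySem.Dict.empty (fun inner =>
                  if inner.contains a2 then inner else inner.insert a2 (pvWrap (pvV td ia.2 a2)))) res) res)
      = (fun res anchors =>
          (pvSufPairs (PySem.List.sorted (PySem.Set.ofList anchors) (fun x => x) false)).foldl
            (fun res p =>
              res.modify p.1 PySem.Dict.empty (fun inner =>
                if inner.contains p.2 then inner else inner.insert p.2 (pvWrap (pvV td p.1 p.2)))) res) := by
    funext res l
    have h := pv_enum_fold (fun res a1 a2 =>
        res.modify a1 PySem.Dict.empty (fun inner =>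
          if inner.contains a2 then inner else inner.insert a2 (pvWrap (pvV td a1 a2))))
      (PySem.List.sorted (PySem.Set.ofList l) (fun x => x) false)
      (PySem.List.sorted (PySem.Set.ofList l) (fun x => x) false) 0 (by simp) res
    simp only [Nat.cast_zero] at h
    rw [h]
  rw [hfnB, ← List.foldl_flatMap]
  rw [show ((pvRA td).values.flatMap
      (fun l => pvSufPairs (PySem.List.sorted (PySem.Set.ofList l) (fun x => x) false))) = pvPS td from rfl]
  rw [pv_build]
  -- items of the built nested dict
  show (List.map _ _).map _ = _
  rw [List.map_map, pvC]
  apply List.map_congr_left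
  intro a1 ha1
  show (a1, _) = (a1, _)
  apply congrArg
  apply List.map_congr_left
  intro a2 ha2
  show (a2, pvWrap (pvV td a1 a2)) = (a2, pvWrap (((pvSnds (pvPS td) a1).count a2 : Nat) : Int))
  have hmem : (a1, a2) ∈ pvPS td := by
    have h2 : a2 ∈ pvSnds (pvPS td) a1 := (pv_mem_dedup _ _).mp ha2
    rw [pv_mem_snds] at h2
    exact h2
  have hlt : a1 < a2 := pv_PS_lt td (a1, a2) hmem
  rw [pv_V_eq_count td a1 a2 hlt, pv_count_snds]

-- ===== VERDICT (by name: the statement is the Claim_ definition above) =====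
theorem create_anchor_connectivity_spec : Claim_equal_create_anchor_connectivity := by
  intro td _ _
  unfold Spec_create_anchor_connectivity
  rw [pv_A_result, pv_B_result]
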